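-- pv_equiv track=rewrite | github.com/Evgexajs/spyfallAI | src/orchestrator/game_engine.py | _get_vote_leader_and_count
-- ===== SOURCE A (Python) =====
-- from typing import Optional
--
-- def _get_vote_leader_and_count(votes: dict[str, Optional[str]]) -> tuple[Optional[str], int, int]:
--     """Get the leader (person with most votes) and vote counts.
--
--     Args:
--         votes: Dict mapping voter_id to target_id (or None for abstain).
--
--     Returns:
--         Tuple of (leader_id, votes_for_leader, total_voters_excluding_leader).
--     """
--     vote_counts: dict[str, int] = {}
--     for voter_id, target in votes.items():
--         if target is not None:
--             vote_counts[target] = vote_counts.get(target, 0) + 1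
--
--     if not vote_counts:
--         return None, 0, 0
--
--     max_votes = max(vote_counts.values())
--     leaders = [target for target, count in vote_counts.items() if count == max_votes]
--     leader = leaders[0]
--
--     # Count voters excluding the accused (leader) - they won't vote against themselves
--     voters_excluding_leader = [vid for vid in votes.keys() if vid != leader]
--
--     return leader, max_votes, len(voters_excluding_leader)
-- ===== SOURCE B (Python) =====
-- from typing import Optional
--
-- def _get_vote_leader_and_count(votes: dict[str, Optional[str]]) -> tuple[Optional[str], int, int]:
--     # No tally dict: running argmax over the raw target stream with brute-force
--     # list.count; strict '>' keeps the first target reaching the global maximum,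
--     # which is the first-inserted max-count key. Third component by arithmetic.
--     targets = [t for t in votes.values() if t is not None]
--     leader: Optional[str] = None
--     max_votes = 0
--     for t in targets:
--         c = targets.count(t)
--         if c > max_votes:
--             leader, max_votes = t, c
--     if leader is None:
--         return None, 0, 0
--     return leader, max_votes, len(votes) - (1 if leader in votes else 0)
-- ===== Notes on version B (the rewrite author's own statement) =====
-- stated objective: alternative
-- what changed: B drops the tally dict entirely: it runs a single running-argmax loop over the raw target stream, recomputing each target's multiplicity with list.count (strict '>' preserves A's first-insertion tie-break), and replaces the voters-excluding-leader filter pass with the closed form len(votes) - (1 if leader in votes else 0).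
import Mathlib
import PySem

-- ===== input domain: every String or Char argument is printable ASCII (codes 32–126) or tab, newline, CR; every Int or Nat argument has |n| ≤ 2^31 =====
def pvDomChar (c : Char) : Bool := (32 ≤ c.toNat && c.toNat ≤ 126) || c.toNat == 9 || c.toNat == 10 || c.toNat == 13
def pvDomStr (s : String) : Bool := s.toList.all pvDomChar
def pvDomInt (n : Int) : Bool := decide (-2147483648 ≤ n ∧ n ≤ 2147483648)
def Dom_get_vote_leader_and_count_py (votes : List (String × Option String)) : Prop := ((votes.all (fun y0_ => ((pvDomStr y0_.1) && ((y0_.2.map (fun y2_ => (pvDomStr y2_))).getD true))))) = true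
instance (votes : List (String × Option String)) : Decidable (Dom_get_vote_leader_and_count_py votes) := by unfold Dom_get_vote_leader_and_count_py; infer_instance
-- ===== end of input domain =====

-- B drops the tally dict: a running-argmax loop over the raw target stream with list.count, and closed-form arithmetic for the voters-excluding-leader count; objective: alternative.


-- ===== PORT A =====
-- the dict parameter arrives as its item list; PySem.Dict.ofList reproduces Python dict construction
def get_vote_leader_and_count_py (votes : List (String × Option String)) : Option String × Int × Int :=
  let d := PySem.Dict.ofList votes
  let vote_counts : PySem.Dict String Int :=
    d.items.foldl (fun vc p =>
      match p.2 with
      | some target => vc.insert target (vc.getD target 0 + 1)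
      | none => vc) PySem.Dict.empty
  if vote_counts.items = [] then (none, 0, 0)
  else
    match PySem.List.max? vote_counts.values (fun v => v) with
    | none => (none, 0, 0)  -- unreachable: vote_counts is nonempty here
    | some max_votes =>
      let leaders := (vote_counts.items.filter (fun p => p.2 == max_votes)).map (fun p => p.1)
      match PySem.List.pyGet? leaders 0 with
      | none => (none, 0, 0)  -- unreachable: max_votes is attained
      | some leader =>
        let voters_excluding_leader := d.keys.filter (fun vid => !(vid == leader))
        (some leader, max_votes, (voters_excluding_leader.length : Int))

-- ===== PORT B =====
def get_vote_leader_and_count_py_alt (votes : List (String × Option String)) : Option String × Int × Int :=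
  let d := PySem.Dict.ofList votes
  let targets := d.values.filterMap id      -- [t for t in votes.values() if t is not None]
  let st := targets.foldl (fun (st : Option String × Int) t =>
      if st.2 < (targets.count t : Int) then (some t, (targets.count t : Int)) else st)
    ((none : Option String), (0 : Int))     -- leader, max_votes running pair
  match st.1 with
  | none => (none, 0, 0)
  | some leader => (some leader, st.2, (d.size : Int) - (if d.contains leader then 1 else 0))

-- ===== PRECONDITION & SPEC =====
def Spec_get_vote_leader_and_count_py (votes : List (String × Option String)) (out : Option String × Int × Int) : Prop := out = get_vote_leader_and_count_py_alt votes
instance (votes : List (String × Option String)) (out : Option String × Int × Int) : Decidable (Spec_get_vote_leader_and_count_py votes out) := by unfold Spec_get_vote_leader_and_count_py; infer_instance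

-- ===== CLAIM (what is proved, stated in full; the proofs are below) =====
def Claim_equal_get_vote_leader_and_count_py : Prop := ∀ (votes : List (String × Option String)), Dom_get_vote_leader_and_count_py votes → Spec_get_vote_leader_and_count_py votes (get_vote_leader_and_count_py votes)

-- ===== LEMMAS AND PROOFS =====

-- A's item loop destructuring (voter, target) is a tally of the filtered target list, i.e. Counter
theorem pv_tally_items (l : List (String × Option String)) (vc : PySem.Dict String Int) :
    l.foldl (fun vc p =>
      match p.2 with
      | some target => vc.insert target (vc.getD target 0 + 1)
      | none => vc) vc
    = ((l.map (fun p => p.2)).filterMap id).foldl (fun d x => d.modify x 0 (· + 1)) vc := by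
  induction l generalizing vc with
  | nil => rfl
  | cons h t ih => cases hh : h.2 <;> simp [hh, ih, PySem.Dict.modify]

-- xs[0] on a list is its head
theorem pv_pyGet?_zero {α : Type} (l : List α) : PySem.List.pyGet? l 0 = l.head? := by
  cases l <;> simp [PySem.List.pyGet?, PySem.List.pyIdx?]

-- B's running-argmax loop: the count is the running max, the leader the FIRST element attaining it
theorem pv_fold_argmax (c : String → Int) (l : List String) (o : Option String) (m : Int) :
    l.foldl (fun st t => if st.2 < c t then (some t, c t) else st) (o, m)
    = ((if m < l.foldl (fun a x => max a (c x)) m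
          then l.find? (fun x => c x == l.foldl (fun a x => max a (c x)) m)
          else o),
       l.foldl (fun a x => max a (c x)) m) := by
  induction l generalizing o m with
  | nil => simp
  | cons h t ih =>
    simp only [List.foldl_cons]
    by_cases hm : m < c h
    · rw [if_pos hm, max_eq_right hm.le, ih]
      have hle := PySem.List.le_foldl_max_int t c (c h)
      set M := t.foldl (fun a x => max a (c x)) (c h) with hM
      have hmM : m < M := lt_of_lt_of_le hm hle.1
      rw [if_pos hmM]
      by_cases he : c h = M
      · have : ¬ c h < M := by omega
        rw [if_neg this, List.find?_cons_of_pos (by simp [he])]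
      · have : c h < M := lt_of_le_of_ne hle.1 he
        rw [if_pos this, List.find?_cons_of_neg (by simp [he])]
    · rw [if_neg hm]
      have hhm : c h ≤ m := le_of_not_gt hm
      rw [max_eq_left hhm, ih]
      set M := t.foldl (fun a x => max a (c x)) m with hM
      by_cases hmM : m < M
      · rw [if_pos hmM, if_pos hmM, List.find?_cons_of_neg (by simp only [beq_iff_eq]; omega)]
      · rw [if_neg hmM, if_neg hmM]

-- find? p, skipping elements on which q is false and p is false, is unchanged
theorem pv_find?_filter_drop (p q : String → Bool) (h : String) (hp : p h = false) (t : List String) :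
    List.find? p (t.filter (fun x => q x && !(x == h)))
      = List.find? p (t.filter q) := by
  induction t with
  | nil => rfl
  | cons a t ih =>
    by_cases hah : a = h
    · subst hah
      by_cases hq : q a = true
      · simp [hq, hp, ih]
      · simp [Bool.eq_false_iff.mpr hq, ih]
    · have : (a == h) = false := by simp [hah]
      by_cases hq : q a = true
      · by_cases hpa : p a = true
        · simp [hq, this, hpa]
        · simp [hq, this, Bool.eq_false_iff.mpr hpa, ih]
      · simp [Bool.eq_false_iff.mpr hq, ih]

-- find? over a foldl of Set.add = find? over the seen part, then over the unseen part of the stream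
theorem pv_find?_foldl_add (p : String → Bool) (l : List String) (s : List String) :
    List.find? p (l.foldl PySem.Set.add s)
      = (List.find? p s).or (List.find? p (l.filter (fun x => !(decide (x ∈ s))))) := by
  induction l generalizing s with
  | nil => simp
  | cons h t ih =>
    simp only [List.foldl_cons]
    by_cases hc : h ∈ s
    · have hadd : PySem.Set.add s h = s := by
        simp [PySem.Set.add, PySem.Set.contains, hc]
      rw [hadd, ih, List.filter_cons]
      simp [hc]
    · have hadd : PySem.Set.add s h = s ++ [h] := by
        simp [PySem.Set.add, PySem.Set.contains, hc]
      rw [hadd, ih, List.find?_append, Option.or_assoc, List.filter_cons]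
      have hpredh : (!(decide (h ∈ s))) = true := by simp [hc]
      rw [if_pos hpredh]
      congr 1
      by_cases hp : p h = true
      · rw [List.find?_cons_of_pos hp]
        simp [List.find?, hp]
      · have hpf : p h = false := Bool.eq_false_iff.mpr hp
        have hfh : List.find? p [h] = none := by simp [List.find?, hpf]
        rw [hfh, Option.none_or, List.find?_cons_of_neg (by simp [hpf])]
        have hfilter : t.filter (fun x => !(decide (x ∈ s ++ [h])))
            = t.filter (fun x => (!(decide (x ∈ s))) && !(x == h)) := by
          apply List.filter_congr; intro x _
          by_cases hxs : x ∈ s <;> by_cases hxh : x = h <;> simp [hxs, hxh]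
        rw [hfilter, pv_find?_filter_drop p (fun x => !(decide (x ∈ s))) h hpf t]

-- the first match in a stream is the first match among its first occurrences
theorem pv_find?_ofList (p : String → Bool) (l : List String) :
    List.find? p (PySem.Set.ofList l) = List.find? p l := by
  rw [PySem.Set.ofList_eq_foldl, pv_find?_foldl_add]
  simp

-- dropping one named element from a duplicate-free list shortens it by exactly its membership
theorem pv_filter_ne_length (x : String) (l : List String) (hnd : l.Nodup) :
    ((l.filter (fun v => !(v == x))).length : Int)
      = (l.length : Int) - (if x ∈ l then (1 : Int) else 0) := by
  induction l with
  | nil => simp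
  | cons a t ih =>
    rcases List.nodup_cons.mp hnd with ⟨ha, ht⟩
    have iht := ih ht
    by_cases hax : a = x
    · subst hax
      have hpa : (!(a == a)) = false := by simp
      have hnm : a ∉ t := ha
      rw [List.filter_cons, hpa]
      simp only [Bool.false_eq_true, if_false, List.length_cons, List.mem_cons, true_or, if_pos]
      rw [iht, if_neg hnm]
      push_cast
      ring
    · have hpa : (!(a == x)) = true := by simp [hax]
      rw [List.filter_cons, hpa]
      simp only [if_true, List.length_cons, List.mem_cons]
      have hxa : ¬ x = a := fun h => hax h.symm
      push_cast
      rw [iht]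
      by_cases hx : x ∈ t
      · rw [if_pos hx, if_pos (Or.inr hx)]
        ring
      · rw [if_neg hx, if_neg (by intro h; rcases h with h | h; exact absurd h hxa; exact absurd h hx)]
        ring

-- ===== VERDICT (by name: the statement is the Claim_ definition above) =====
theorem get_vote_leader_and_count_py_spec : Claim_equal_get_vote_leader_and_count_py := by
  intro votes _
  unfold Spec_get_vote_leader_and_count_py
  simp only [get_vote_leader_and_count_py, get_vote_leader_and_count_py_alt]
  set d := PySem.Dict.ofList votes with hd
  have hnd : d.keys.Nodup := PySem.Dict.nodup_keys_ofList votes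
  set xs : List String := d.values.filterMap id with hxs
  have hvals : d.values = d.items.map (fun p => p.2) := rfl
  set c : String → Int := fun k => (xs.count k : Int) with hc
  have htallyA :
      d.items.foldl (fun vc p =>
        match p.2 with
        | some target => vc.insert target (vc.getD target 0 + 1)
        | none => vc) (PySem.Dict.empty : PySem.Dict String Int) = PySem.Dict.counter xs := by
    rw [pv_tally_items, ← hvals, ← hxs, PySem.Dict.counter_eq_foldl]
  rw [htallyA]
  have hitems : (PySem.Dict.counter xs).items
      = (PySem.Set.ofList xs).map (fun k => (k, c k)) := PySem.Dict.items_counter xs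
  -- B's fold, characterised
  have hBfold := pv_fold_argmax c xs none 0
  set MB : Int := xs.foldl (fun a x => max a (c x)) 0 with hMB
  have hMBle := PySem.List.le_foldl_max_int xs c 0
  cases hK : PySem.Set.ofList xs with
  | nil =>
    have hxsnil : xs = [] := by
      cases hxx : xs with
      | nil => rfl
      | cons a t =>
        exfalso
        have : a ∈ PySem.Set.ofList xs := (PySem.Set.mem_ofList xs a).mpr (by rw [hxx]; simp)
        rw [hK] at this; simp at this
    have h1 : (PySem.Dict.counter xs).items = [] := by rw [hitems, hK]; rfl
    rw [if_pos h1, hxsnil]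
    rfl
  | cons k0 ks =>
    have h1 : (PySem.Dict.counter xs).items = (k0 :: ks).map (fun k => (k, c k)) := by
      rw [hitems, hK]
    have h1ne : ¬ (PySem.Dict.counter xs).items = [] := by rw [h1]; simp
    rw [if_neg h1ne]
    have hk0xs : k0 ∈ xs := by
      have : k0 ∈ PySem.Set.ofList xs := by rw [hK]; simp
      exact (PySem.Set.mem_ofList xs k0).mp this
    have hcpos : ∀ x ∈ xs, (1 : Int) ≤ c x := by
      intro x hx
      have : 0 < xs.count x := List.count_pos_iff.mpr hx
      simp only [hc]
      omega
    -- A's maximum over the counter values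
    set MA : Int := ks.foldl (fun a x => max a (c x)) (c k0) with hMA
    have hMAle := PySem.List.le_foldl_max_int ks c (c k0)
    have hvalsA : (PySem.Dict.counter xs).values = (k0 :: ks).map c := by
      show (PySem.Dict.counter xs).items.map (fun p => p.2) = _
      rw [h1]; simp
    have hmaxA : PySem.List.max? ((PySem.Dict.counter xs).values) (fun v => v) = some MA := by
      rw [hvalsA, List.map_cons, PySem.List.max?_id_cons, List.foldl_map]
    -- MA = MB
    have hmemSet : ∀ x, x ∈ k0 :: ks → x ∈ xs := by
      intro x hx
      exact (PySem.Set.mem_ofList xs x).mp (by rw [hK]; exact hx)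
    have hboundA : ∀ x ∈ xs, c x ≤ MA := by
      intro x hx
      have hx' : x ∈ PySem.Set.ofList xs := (PySem.Set.mem_ofList xs x).mpr hx
      rw [hK] at hx'
      rcases List.mem_cons.mp hx' with h | h
      · subst h; exact hMAle.1
      · exact hMAle.2 x h
    have hMAmem : ∃ x ∈ xs, MA = c x := by
      have hfm : (ks.map c).foldl max (c k0) = MA := by rw [List.foldl_map]
      have := PySem.List.foldl_max_mem (ks.map c) (c k0)
      rw [hfm] at this
      rcases this with h | h
      · exact ⟨k0, hk0xs, h⟩
      · rcases List.mem_map.mp h with ⟨x, hx, hxe⟩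
        exact ⟨x, hmemSet x (List.mem_cons_of_mem _ hx), hxe.symm⟩
    have hMBmem : MB = 0 ∨ ∃ x ∈ xs, MB = c x := by
      have hfm : (xs.map c).foldl max 0 = MB := by rw [List.foldl_map]
      have := PySem.List.foldl_max_mem (xs.map c) 0
      rw [hfm] at this
      rcases this with h | h
      · exact Or.inl h
      · rcases List.mem_map.mp h with ⟨x, hx, hxe⟩
        exact Or.inr ⟨x, hx, hxe.symm⟩
    have hMBpos : 1 ≤ MB := le_trans (hcpos k0 hk0xs) (hMBle.2 k0 hk0xs)
    have hMeq : MA = MB := by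
      apply le_antisymm
      · rcases hMAmem with ⟨x, hx, he⟩
        rw [he]; exact hMBle.2 x hx
      · rcases hMBmem with h | ⟨x, hx, he⟩
        · omega
        · rw [he]; exact hboundA x hx
    -- leaders agree: both are the first stream element attaining the maximum
    have hleaders : ((PySem.Dict.counter xs).items.filter (fun p => p.2 == MA)).map (fun p => p.1)
        = (k0 :: ks).filter (fun k => c k == MA) := by
      rw [h1, List.filter_map, List.map_map]
      simp [Function.comp_def]
    have hfindSet : List.find? (fun k => c k == MA) (k0 :: ks)
        = List.find? (fun k => c k == MA) xs := by
      rw [← hK, pv_find?_ofList]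
    have hfind_some : ∃ lk, List.find? (fun k => c k == MA) xs = some lk := by
      rcases hMAmem with ⟨x, hx, he⟩
      have : (List.find? (fun k => c k == MA) xs).isSome := by
        apply List.find?_isSome.mpr
        exact ⟨x, hx, by simp [he]⟩
      exact Option.isSome_iff_exists.mp this
    rcases hfind_some with ⟨lk, hlk⟩
    have hlead : PySem.List.pyGet?
        (((PySem.Dict.counter xs).items.filter (fun p => p.2 == MA)).map (fun p => p.1)) 0
        = some lk := by
      rw [hleaders, pv_pyGet?_zero, List.head?_filter, hfindSet, hlk]
    rw [hmaxA]
    dsimp only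
    rw [hlead]
    dsimp only
    -- B's side
    rw [hBfold]
    have hcond : (0 : Int) < MB := by omega
    rw [if_pos hcond, ← hMeq, hlk]
    dsimp only
    rw [hMeq]
    -- third component
    have hthird : ((d.keys.filter (fun vid => !(vid == lk))).length : Int)
        = (d.size : Int) - (if d.contains lk then (1 : Int) else 0) := by
      rw [pv_filter_ne_length lk d.keys hnd, PySem.Dict.contains_eq_decide_mem_keys]
      have : (d.size : Int) = (d.keys.length : Int) := by
        unfold PySem.Dict.size PySem.Dict.keys
        simp
      rw [this]
      by_cases hm : lk ∈ d.keys <;> simp [hm]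
    rw [hthird]
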